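-- pv_equiv track=rewrite | github.com/jujuwon/Algorithm | baekjoon/BJ9519/BJ9519.py | wink
-- ===== SOURCE A (Python) =====
-- def wink(word_list):
--     if len(word_list) % 2 == 0:
--         index = len(word_list) - 1
--     else:
--         index = len(word_list) - 2
--     while index > 0:
--         word_list.append(word_list.pop(index))
--         index -= 2
--     return word_list
-- ===== SOURCE B (Python) =====
-- def wink(word_list):
--     # One O(n) pass: even-index elements in order, then odd-index elements reversed.
--     evens = []
--     odds = []
--     take_even = True
--     for x in word_list:
--         if take_even:
--             evens.append(x)
--         else:
--             odds.append(x)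
--         take_even = not take_even
--     odds.reverse()
--     return evens + odds
-- ===== Notes on version B (the rewrite author's own statement) =====
-- stated objective: faster
-- what changed: A repeatedly pops an interior element and appends it to the end (each pop is an O(n) shift); B makes a single forward pass splitting the list into even- and odd-position elements and returns evens followed by the reversed odds.
import Mathlib
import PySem

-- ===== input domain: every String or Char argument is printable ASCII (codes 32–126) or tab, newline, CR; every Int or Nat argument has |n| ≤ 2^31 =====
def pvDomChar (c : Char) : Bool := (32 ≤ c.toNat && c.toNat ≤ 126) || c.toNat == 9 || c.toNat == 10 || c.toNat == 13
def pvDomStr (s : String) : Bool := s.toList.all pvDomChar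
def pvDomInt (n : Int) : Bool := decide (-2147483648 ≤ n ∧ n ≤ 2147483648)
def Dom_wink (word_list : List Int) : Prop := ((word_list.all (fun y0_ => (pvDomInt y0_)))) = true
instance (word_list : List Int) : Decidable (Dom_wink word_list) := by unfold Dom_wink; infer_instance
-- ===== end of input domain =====

-- B changes the algorithm: one forward pass splitting evens/odds instead of A's repeated
-- interior pop-and-append (O(n) vs O(n^2)). A mutates its argument in place; the
-- equivalence proved here is about the RETURN value only.

-- ===== PORT A =====
-- while index > 0: word_list.append(word_list.pop(index)); index -= 2
def winkLoop (word_list : List Int) (index : Int) : List Int :=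
  if _h : index > 0 then
    match PySem.List.pop? word_list index with
    | some (v, rest) => winkLoop (rest ++ [v]) (index - 2)
    | none => word_list   -- IndexError; unreachable from wink's own calls
  else word_list
termination_by index.toNat
decreasing_by omega

def wink (word_list : List Int) : List Int :=
  if (word_list.length : Int) % 2 == 0 then
    winkLoop word_list ((word_list.length : Int) - 1)
  else
    winkLoop word_list ((word_list.length : Int) - 2)

-- ===== PORT B =====
-- the for loop: state (evens, odds, take_even), appends at the back
def winkAltLoop (word_list : List Int) (st : List Int × List Int × Bool) :
    List Int × List Int × Bool :=
  word_list.foldl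
    (fun st x =>
      if st.2.2 then (st.1 ++ [x], st.2.1, !st.2.2) else (st.1, st.2.1 ++ [x], !st.2.2))
    st

def wink_alt (word_list : List Int) : List Int :=
  let st := winkAltLoop word_list ([], [], true)
  st.1 ++ st.2.1.reverse

-- ===== PRECONDITION & SPEC =====
def Spec_wink (word_list : List Int) (out : List Int) : Prop := out = wink_alt word_list
instance (word_list : List Int) (out : List Int) : Decidable (Spec_wink word_list out) := by unfold Spec_wink; infer_instance

-- ===== CLAIM (what is proved, stated in full; the proofs are below) =====
def Claim_equal_wink : Prop := ∀ (word_list : List Int), Dom_wink word_list → Spec_wink word_list (wink word_list)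

-- ===== LEMMAS AND PROOFS =====

-- elements at even / odd positions
def ev : List Int → List Int
  | [] => []
  | [a] => [a]
  | a :: _ :: t => a :: ev t

def od : List Int → List Int
  | [] => []
  | [_] => []
  | _ :: b :: t => b :: od t

lemma ev_append_pair : ∀ (ys : List Int) (a b : Int), ys.length % 2 = 0 →
    ev (ys ++ [a, b]) = ev ys ++ [a] := by
  intro ys
  induction ys using ev.induct with
  | case1 => intro a b _; rfl
  | case2 x => intro a b h; simp at h
  | case3 x y t ih =>
    intro a b h
    simp only [List.length_cons] at h
    simp [ev, ih a b (by omega)]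

lemma od_append_pair : ∀ (ys : List Int) (a b : Int), ys.length % 2 = 0 →
    od (ys ++ [a, b]) = od ys ++ [b] := by
  intro ys
  induction ys using od.induct with
  | case1 => intro a b _; rfl
  | case2 x => intro a b h; simp at h
  | case3 x y t ih =>
    intro a b h
    simp only [List.length_cons] at h
    simp [od, ih a b (by omega)]

lemma ev_append_single : ∀ (ys : List Int) (a : Int), ys.length % 2 = 0 →
    ev (ys ++ [a]) = ev ys ++ [a] := by
  intro ys
  induction ys using ev.induct with
  | case1 => intro a _; rfl
  | case2 x => intro a h; simp at h
  | case3 x y t ih =>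
    intro a h
    simp only [List.length_cons] at h
    simp [ev, ih a (by omega)]

lemma od_append_single : ∀ (ys : List Int) (a : Int), ys.length % 2 = 0 →
    od (ys ++ [a]) = od ys := by
  intro ys
  induction ys using od.induct with
  | case1 => intro a _; rfl
  | case2 x => intro a h; simp at h
  | case3 x y t ih =>
    intro a h
    simp only [List.length_cons] at h
    simp [od, ih a (by omega)]

-- pop at the index of the head of the suffix
lemma pop?_append_cons (pre suf : List Int) (x : Int) :
    PySem.List.pop? (pre ++ x :: suf) (pre.length : Int) = some (x, pre ++ suf) := by
  rw [PySem.List.pop?_natCast (pre ++ x :: suf) pre.length (by simp)]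
  refine congrArg some (Prod.ext ?_ ?_)
  · simp
  · rw [List.eraseIdx_append_of_length_le (le_refl _)]; simp

-- one iteration of A's while loop
lemma winkLoop_step (pre suf : List Int) (x : Int) (hi : 0 < (pre.length : Int)) :
    winkLoop (pre ++ x :: suf) (pre.length : Int) =
      winkLoop (pre ++ suf ++ [x]) ((pre.length : Int) - 2) := by
  rw [winkLoop, dif_pos hi, pop?_append_cons]

lemma winkLoop_stop (l : List Int) (i : Int) (h : ¬ i > 0) : winkLoop l i = l := by
  rw [winkLoop, dif_neg h]

-- the A-side loop, characterised on lists split as (even-length prefix ++ rest)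
lemma winkLoop_eq : ∀ (k : Nat) (ys rest : List Int), ys.length = 2 * k + 2 →
    winkLoop (ys ++ rest) ((2 * k + 1 : Nat) : Int) = ev ys ++ rest ++ (od ys).reverse := by
  intro k
  induction k with
  | zero =>
    intro ys rest hlen
    match ys, hlen with
    | [a, b], _ =>
      have h1 : ((2 * 0 + 1 : Nat) : Int) = ((([a] : List Int).length : Nat) : Int) := by simp
      have h2 : ([a, b] : List Int) ++ rest = [a] ++ b :: rest := by simp
      rw [h1, h2, winkLoop_step [a] rest b (by simp)]
      rw [winkLoop_stop _ _ (by simp)]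
      simp [ev, od]
  | succ k ih =>
    intro ys rest hlen
    rcases ys.eq_nil_or_concat with rfl | ⟨ys1, b, rfl⟩
    · simp at hlen
    rcases ys1.eq_nil_or_concat with rfl | ⟨zs, a, rfl⟩
    · simp at hlen
    have hzs : zs.length = 2 * k + 2 := by simpa using hlen
    have hsplit : (zs.concat a).concat b ++ rest = (zs ++ [a]) ++ b :: rest := by simp
    have hidx : ((2 * (k + 1) + 1 : Nat) : Int) = (((zs ++ [a]).length : Nat) : Int) := by
      simp only [List.length_append, List.length_cons, List.length_nil, hzs]; omega
    rw [hsplit, hidx, winkLoop_step (zs ++ [a]) rest b (by simp)]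
    have hidx2 : (((zs ++ [a]).length : Nat) : Int) - 2 = ((2 * k + 1 : Nat) : Int) := by
      simp only [List.length_append, List.length_cons, List.length_nil, hzs]; omega
    rw [hidx2]
    have hIH := ih zs ([a] ++ rest ++ [b]) hzs
    rw [show zs ++ [a] ++ rest ++ [b] = zs ++ ([a] ++ rest ++ [b]) by simp, hIH]
    have heven : zs.length % 2 = 0 := by omega
    rw [show (zs.concat a).concat b = zs ++ [a, b] by simp,
      ev_append_pair zs a b heven, od_append_pair zs a b heven]
    simp

-- the B-side fold, characterised by ev / od
lemma winkAltLoop_eq : ∀ (l e o : List Int),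
    winkAltLoop l (e, o, true) = (e ++ ev l, o ++ od l, decide (l.length % 2 = 0)) ∧
    winkAltLoop l (e, o, false) = (e ++ od l, o ++ ev l, decide (l.length % 2 = 1)) := by
  intro l
  induction l using ev.induct with
  | case1 => intro e o; simp [winkAltLoop, ev, od]
  | case2 x => intro e o; simp [winkAltLoop, ev, od, List.foldl]
  | case3 x y t ih =>
    intro e o
    have hpar0 : decide ((x :: y :: t).length % 2 = 0) = decide (t.length % 2 = 0) := by
      have : (x :: y :: t).length % 2 = t.length % 2 := by simp only [List.length_cons]; omega
      rw [this]
    have hpar1 : decide ((x :: y :: t).length % 2 = 1) = decide (t.length % 2 = 1) := by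
      have : (x :: y :: t).length % 2 = t.length % 2 := by simp only [List.length_cons]; omega
      rw [this]
    constructor
    · have h1 := (ih (e ++ [x]) (o ++ [y])).1
      calc winkAltLoop (x :: y :: t) (e, o, true)
          = winkAltLoop t (e ++ [x], o ++ [y], true) := by
            simp [winkAltLoop, List.foldl]
        _ = (e ++ ev (x :: y :: t), o ++ od (x :: y :: t), decide ((x :: y :: t).length % 2 = 0)) := by
            rw [h1, hpar0]; simp [ev, od]
    · have h2 := (ih (e ++ [y]) (o ++ [x])).2
      calc winkAltLoop (x :: y :: t) (e, o, false)
          = winkAltLoop t (e ++ [y], o ++ [x], false) := by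
            simp [winkAltLoop, List.foldl]
        _ = (e ++ od (x :: y :: t), o ++ ev (x :: y :: t), decide ((x :: y :: t).length % 2 = 1)) := by
            rw [h2, hpar1]; simp [ev, od]

lemma wink_alt_eq (l : List Int) : wink_alt l = ev l ++ (od l).reverse := by
  simp [wink_alt, (winkAltLoop_eq l [] []).1]

lemma wink_eq (l : List Int) : wink l = ev l ++ (od l).reverse := by
  unfold wink
  rcases Nat.even_or_odd l.length with ⟨m, hm⟩ | ⟨m, hm⟩
  · -- even length
    rw [if_pos (by simp [hm]; try omega)]
    match m, hm with
    | 0, hm =>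
      have : l = [] := List.eq_nil_of_length_eq_zero (by omega)
      subst this
      rw [winkLoop_stop _ _ (by simp)]
      simp [ev, od]
    | (k+1), hm =>
      have hlen : l.length = 2 * k + 2 := by omega
      have hidx : (l.length : Int) - 1 = ((2 * k + 1 : Nat) : Int) := by
        rw [hlen]; omega
      rw [hidx]
      have := winkLoop_eq k l [] hlen
      simpa using this
  · -- odd length
    rw [if_neg (by simp [hm]; try omega)]
    match m, hm with
    | 0, hm =>
      match l, hm with
      | [a], _ =>
        rw [winkLoop_stop _ _ (by simp)]
        simp [ev, od]
    | (k+1), hm =>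
      have hlen : l.length = 2 * k + 3 := by omega
      rcases l.eq_nil_or_concat with rfl | ⟨ys, a, rfl⟩
      · simp at hlen
      have hys : ys.length = 2 * k + 2 := by simpa using hlen
      have hidx : ((ys.concat a).length : Int) - 2 = ((2 * k + 1 : Nat) : Int) := by
        simp only [List.length_concat, hys]; omega
      rw [hidx, show ys.concat a = ys ++ [a] by simp, winkLoop_eq k ys [a] hys]
      have heven : ys.length % 2 = 0 := by omega
      rw [ev_append_single ys a heven, od_append_single ys a heven]
      try simp

-- ===== VERDICT (by name: the statement is the Claim_ definition above) =====
theorem wink_spec : Claim_equal_wink := by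
  intro l _
  unfold Spec_wink
  rw [wink_eq, wink_alt_eq]
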